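-- pv_equiv track=rewrite | github.com/mysticflounder/equational-magma-theorems | analysis/count_mirrors.py | canonicalize_vars
-- ===== SOURCE A (Python) =====
-- CANON_VARS = list('xyzwuv')
--
-- def canonicalize_vars(eq_str):
--     """Rename single-letter variables to first-appearance order (x, y, z, w, u, v).
--
--     The ETP catalog uses at most 6 distinct single-letter variables per equation.
--     """
--     mapping = {}
--     idx = 0
--     result = []
--     for ch in eq_str:
--         if ch.isalpha():
--             if ch not in mapping:
--                 if idx >= len(CANON_VARS):
--                     raise ValueError(
--                         f"equation has more than {len(CANON_VARS)} variables: {eq_str}"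
--                     )
--                 mapping[ch] = CANON_VARS[idx]
--                 idx += 1
--             result.append(mapping[ch])
--         else:
--             result.append(ch)
--     return ''.join(result)
-- ===== SOURCE B (Python) =====
-- CANON_VARS = list('xyzwuv')
--
-- def canonicalize_vars(eq_str):
--     """Two-pass: collect distinct letters in first-appearance order, then translate."""
--     seen = list(dict.fromkeys(c for c in eq_str if c.isalpha()))
--     if len(seen) > len(CANON_VARS):
--         raise ValueError(
--             f"equation has more than {len(CANON_VARS)} variables: {eq_str}"
--         )
--     mapping = dict(zip(seen, CANON_VARS))
--     return ''.join(mapping.get(c, c) for c in eq_str)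
-- ===== Notes on version B (the rewrite author's own statement) =====
-- stated objective: idiomatic
-- what changed: One interleaved loop that builds the mapping while emitting is split into two passes: an ordered-dedup pass that discovers all variables (and validates the count once), then a pure translation pass over the string via a prebuilt dict.
import Mathlib
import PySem

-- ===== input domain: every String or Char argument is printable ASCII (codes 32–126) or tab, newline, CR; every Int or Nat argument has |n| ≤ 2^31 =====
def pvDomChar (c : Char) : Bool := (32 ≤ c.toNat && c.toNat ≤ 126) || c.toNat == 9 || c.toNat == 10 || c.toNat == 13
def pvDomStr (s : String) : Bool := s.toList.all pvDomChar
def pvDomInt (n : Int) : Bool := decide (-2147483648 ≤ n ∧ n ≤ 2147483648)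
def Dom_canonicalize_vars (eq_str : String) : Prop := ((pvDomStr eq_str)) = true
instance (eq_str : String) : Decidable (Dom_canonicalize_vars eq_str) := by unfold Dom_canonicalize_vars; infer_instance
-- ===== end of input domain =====

-- B restructures A's single interleaved loop into two passes (ordered dedup of the variables, then a pure translation); same results, ValueError inputs excluded by Pre_.

-- CANON_VARS = list('xyzwuv')
def CANON_VARS : List Char := ['x', 'y', 'z', 'w', 'u', 'v']

-- ===== PORT A =====
-- A's for-loop: state = (mapping, idx, result); `none` = the ValueError raise
def canonGoA : List Char → PySem.Dict Char Char → Nat → List Char → Option (List Char)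
  | [], _, _, acc => some acc
  | ch :: rest, m, idx, acc =>
    if PySem.Chars.isalpha ch then
      match m.get? ch with
      | some v => canonGoA rest m idx (acc ++ [v])
      | none =>
        if idx ≥ CANON_VARS.length then none
        else canonGoA rest (m.insert ch (CANON_VARS.getD idx 'x')) (idx + 1)
               (acc ++ [CANON_VARS.getD idx 'x'])
    else canonGoA rest m idx (acc ++ [ch])

def canonicalize_vars (eq_str : String) : String :=
  match canonGoA eq_str.toList PySem.Dict.empty 0 [] with
  | some res => String.ofList res      -- ''.join(result)
  | none => ""                         -- ValueError (excluded by Pre_)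

-- ===== PORT B =====
def canonicalize_vars_alt (eq_str : String) : String :=
  let l := eq_str.toList
  -- seen = list(dict.fromkeys(c for c in eq_str if c.isalpha()))
  let seen := PySem.List.dedup (l.filter PySem.Chars.isalpha)
  if seen.length > CANON_VARS.length then ""   -- ValueError (excluded by Pre_)
  else
    -- mapping = dict(zip(seen, CANON_VARS)); ''.join(mapping.get(c, c) for c in eq_str)
    let mapping := PySem.Dict.ofList (seen.zip CANON_VARS)
    String.ofList (l.map (fun c => mapping.getD c c))

-- ===== PRECONDITION & SPEC =====
-- Pre_ excludes exactly the strings with more than 6 distinct alphabetic characters, on which A raises ValueError (B raises the same error there).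
def Pre_canonicalize_vars (eq_str : String) : Prop :=
  (PySem.List.dedup (eq_str.toList.filter PySem.Chars.isalpha)).length ≤ 6
instance (eq_str : String) : Decidable (Pre_canonicalize_vars eq_str) := by
  unfold Pre_canonicalize_vars; infer_instance

def pvWitness_canonicalize_vars : String := "a*(b+c) = (a*b)+(a*c)"

def Spec_canonicalize_vars (eq_str : String) (out : String) : Prop := out = canonicalize_vars_alt eq_str
instance (eq_str : String) (out : String) : Decidable (Spec_canonicalize_vars eq_str out) := by unfold Spec_canonicalize_vars; infer_instance

-- ===== CLAIM (what is proved, stated in full; the proofs are below) =====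
def Claim_equal_canonicalize_vars : Prop := ∀ (eq_str : String), Dom_canonicalize_vars eq_str → Pre_canonicalize_vars eq_str → Spec_canonicalize_vars eq_str (canonicalize_vars eq_str)

-- ===== LEMMAS AND PROOFS =====

-- B's per-character translation, characterised by position in the dedup list
lemma getD_ofList_zip (S vs : List Char) (hnd : S.Nodup) (hle : S.length ≤ vs.length)
    (c d : Char) :
    (PySem.Dict.ofList (S.zip vs)).getD c d =
      if c ∈ S then vs.getD (S.idxOf c) d else d := by
  have hfst : (S.zip vs).map Prod.fst = S := List.map_fst_zip hle
  have hitems : (PySem.Dict.ofList (S.zip vs)).items = S.zip vs := by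
    have := PySem.Dict.items_foldl_insert_fresh (S.zip vs) Prod.fst Prod.snd
      (PySem.Dict.empty (κ := Char) (ν := Char))
      (by intro a _; simp) (by rw [hfst]; exact hnd)
    simpa [PySem.Dict.ofList, PySem.Dict.update] using this
  have hkeys : (PySem.Dict.ofList (S.zip vs)).keys = S := by
    simp [PySem.Dict.keys, hitems, hfst]
  by_cases hc : c ∈ S
  · have hidx : S.idxOf c < S.length := List.idxOf_lt_length_of_mem hc
    have hvlt : S.idxOf c < vs.length := lt_of_lt_of_le hidx hle
    have hmem : (c, vs[S.idxOf c]'hvlt) ∈ (PySem.Dict.ofList (S.zip vs)).items := by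
      rw [hitems]
      have hz : (S.zip vs)[S.idxOf c]'(by simp [List.length_zip]; omega) =
          (S[S.idxOf c]'hidx, vs[S.idxOf c]'hvlt) := by simp
      rw [List.getElem_idxOf hidx] at hz
      exact hz ▸ List.getElem_mem _
    have := PySem.Dict.getD_of_mem_items _ hmem (by rw [hkeys]; exact hnd) d
    rw [this, if_pos hc, List.getD_eq_getElem _ _ hvlt]
  · have hcon : (PySem.Dict.ofList (S.zip vs)).contains c = false := by
      rw [PySem.Dict.contains_eq_decide_mem_keys, hkeys]; simp [hc]
    simp [PySem.Dict.getD_of_not_contains _ _ hcon, hc]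

-- position of an already-seen element is unchanged by further updates
lemma idxOf_update_of_mem (s xs : List Char) {c : Char} (hc : c ∈ s) :
    (PySem.Set.update s xs).idxOf c = s.idxOf c := by
  rw [PySem.Set.update_eq_append_filter, List.idxOf_append, if_pos hc]

lemma length_le_update (s xs : List Char) : s.length ≤ (PySem.Set.update s xs).length := by
  rw [PySem.Set.update_eq_append_filter]; simp

-- the invariant of A's loop: given that `m` maps exactly the prefix-seen variables `s`,
-- the loop emits B's translation (indexed by the FINAL seen list)
lemma canonGoA_eq (l : List Char) : ∀ (s : List Char) (m : PySem.Dict Char Char) (acc : List Char),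
    s.Nodup → (∀ c ∈ s, PySem.Chars.isalpha c = true) →
    (∀ c, m.get? c = if c ∈ s then some (CANON_VARS.getD (s.idxOf c) 'x') else none) →
    (PySem.Set.update s (l.filter PySem.Chars.isalpha)).length ≤ CANON_VARS.length →
    canonGoA l m s.length acc =
      some (acc ++ l.map (fun c =>
        if c ∈ PySem.Set.update s (l.filter PySem.Chars.isalpha) then
          CANON_VARS.getD ((PySem.Set.update s (l.filter PySem.Chars.isalpha)).idxOf c) c
        else c)) := by
  induction l with
  | nil => intro s m acc _ _ _ _; simp [canonGoA, PySem.Set.update_nil]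
  | cons c l ih =>
    intro s m acc hnd halpha hm hlen
    by_cases hα : PySem.Chars.isalpha c
    · have hfil : (c :: l).filter PySem.Chars.isalpha = c :: l.filter PySem.Chars.isalpha := by
        simp [hα]
      by_cases hcs : c ∈ s
      · -- repeated variable: dict lookup hits
        have hmc := hm c; rw [if_pos hcs] at hmc
        have hupd : PySem.Set.update s ((c :: l).filter PySem.Chars.isalpha)
            = PySem.Set.update s (l.filter PySem.Chars.isalpha) := by
          rw [hfil, PySem.Set.update_cons, PySem.Set.add_of_mem hcs]
        have hcS : c ∈ PySem.Set.update s (l.filter PySem.Chars.isalpha) :=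
          (PySem.Set.mem_update _ _ _).2 (Or.inl hcs)
        have hidx : (PySem.Set.update s (l.filter PySem.Chars.isalpha)).idxOf c = s.idxOf c :=
          idxOf_update_of_mem _ _ hcs
        have hlt : s.idxOf c < CANON_VARS.length :=
          lt_of_lt_of_le (lt_of_lt_of_le (List.idxOf_lt_length_of_mem hcs)
            (length_le_update s _)) (hupd ▸ hlen)
        have hrec := ih s m (acc ++ [CANON_VARS.getD (s.idxOf c) 'x']) hnd halpha hm (hupd ▸ hlen)
        simp only [canonGoA, hα, if_true, hmc, hrec, hupd]
        rw [List.map_cons, if_pos hcS, hidx, List.getD_eq_getElem _ _ hlt,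
          List.getD_eq_getElem _ _ hlt]
        simp
      · -- new variable: dict lookup misses, idx = s.length < 6
        have hmc := hm c; rw [if_neg hcs] at hmc
        have hadd : PySem.Set.add s c = s ++ [c] := by
          simp [PySem.Set.add, PySem.Set.contains]
          intro h; exact absurd h hcs
        have hupd : PySem.Set.update s ((c :: l).filter PySem.Chars.isalpha)
            = PySem.Set.update (s ++ [c]) (l.filter PySem.Chars.isalpha) := by
          rw [hfil, PySem.Set.update_cons, hadd]
        have hlen' : (PySem.Set.update (s ++ [c]) (l.filter PySem.Chars.isalpha)).length
            ≤ CANON_VARS.length := hupd ▸ hlen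
        have hslt : s.length < CANON_VARS.length := by
          have := length_le_update (s ++ [c]) (l.filter PySem.Chars.isalpha)
          simp at this; omega
        have hnd' : (s ++ [c]).Nodup := by
          simp only [List.nodup_append, List.nodup_singleton, true_and]
          refine ⟨hnd, ?_⟩
          intro a ha b hb
          simp only [List.mem_singleton] at hb
          subst hb
          exact fun h => hcs (h ▸ ha)
        have halpha' : ∀ c' ∈ s ++ [c], PySem.Chars.isalpha c' = true := by
          intro c' hc'
          rcases List.mem_append.1 hc' with h | h
          · exact halpha c' h
          · simp at h; exact h ▸ hα
        have hidxc : (s ++ [c]).idxOf c = s.length := by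
          rw [List.idxOf_append, if_neg hcs]; simp
        have hm' : ∀ c', (m.insert c (CANON_VARS.getD s.length 'x')).get? c'
            = if c' ∈ s ++ [c] then some (CANON_VARS.getD ((s ++ [c]).idxOf c') 'x') else none := by
          intro c'
          rw [PySem.Dict.get?_insert]
          by_cases hcc : c' = c
          · subst hcc; rw [if_pos rfl, if_pos (by simp), hidxc]
          · rw [if_neg hcc, hm c']
            by_cases hc's : c' ∈ s
            · rw [if_pos hc's, if_pos (List.mem_append.2 (Or.inl hc's)),
                List.idxOf_append, if_pos hc's]
            · rw [if_neg hc's, if_neg (by simp [hcc, hc's])]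
        have hrec := ih (s ++ [c]) (m.insert c (CANON_VARS.getD s.length 'x'))
          (acc ++ [CANON_VARS.getD s.length 'x']) hnd' halpha' hm' hlen'
        simp only [List.length_append, List.length_singleton] at hrec
        have hcS : c ∈ PySem.Set.update (s ++ [c]) (l.filter PySem.Chars.isalpha) :=
          (PySem.Set.mem_update _ _ _).2 (Or.inl (by simp))
        have hidxS : (PySem.Set.update (s ++ [c]) (l.filter PySem.Chars.isalpha)).idxOf c
            = s.length := by rw [idxOf_update_of_mem _ _ (by simp), hidxc]
        simp only [canonGoA, hα, if_true, hmc, not_le.2 hslt, hrec, hupd]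
        rw [List.map_cons, if_pos hcS, hidxS, List.getD_eq_getElem _ _ hslt,
          List.getD_eq_getElem _ _ hslt]
        simp
    · -- non-alphabetic character is copied through
      have hfil : (c :: l).filter PySem.Chars.isalpha = l.filter PySem.Chars.isalpha := by
        simp [hα]
      have hcS : c ∉ PySem.Set.update s (l.filter PySem.Chars.isalpha) := by
        intro h
        rcases (PySem.Set.mem_update _ _ _).1 h with h | h
        · exact absurd (halpha c h) (by simp [hα])
        · exact absurd (List.of_mem_filter h) (by simp [hα])
      have hrec := ih s m (acc ++ [c]) hnd halpha hm (by rw [hfil] at hlen; exact hlen)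
      simp only [canonGoA, hα, if_false, Bool.false_eq_true, hrec, hfil]
      rw [List.map_cons, if_neg hcS]
      simp

-- ===== VERDICT (by name: the statement is the Claim_ definition above) =====
theorem canonicalize_vars_spec : Claim_equal_canonicalize_vars := by
  unfold Claim_equal_canonicalize_vars
  intro eq_str _ hpre
  unfold Spec_canonicalize_vars canonicalize_vars canonicalize_vars_alt
  unfold Pre_canonicalize_vars at hpre
  set l := eq_str.toList with hl
  set seen := PySem.List.dedup (l.filter PySem.Chars.isalpha) with hseen
  have hseen' : seen = PySem.Set.update [] (l.filter PySem.Chars.isalpha) := by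
    rw [hseen, PySem.List.dedup_eq_ofList, PySem.Set.update_nil_left]
  have hlen : seen.length ≤ CANON_VARS.length := by simpa [CANON_VARS] using hpre
  have hgo := canonGoA_eq l [] PySem.Dict.empty []
    (by simp) (by simp) (by intro c; simp [PySem.Dict.get?_empty]) (by rw [← hseen']; exact hlen)
  simp only [List.length_nil] at hgo
  rw [← hseen'] at hgo
  rw [hgo, if_neg (not_lt.2 hlen)]
  simp only [List.nil_append]
  congr 1
  apply List.map_congr_left
  intro c _
  rw [getD_ofList_zip seen CANON_VARS (hseen ▸ PySem.List.nodup_dedup _) hlen c c]
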